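-- pv_equiv track=rewrite | github.com/EJahren/my_aoc_solutions | 2015/day11.py | requirement_three
-- ===== SOURCE A (Python) =====
-- def requirement_three(password):
--     """
--     >>> requirement_three('abcdffaa')
--     True
--     >>> requirement_three("abbceffg")
--     True
--     >>> requirement_three("abbcegjk")
--     False
--     """
--     pair_positions = set()
--     for i in range(len(password) - 1):
--         a = password[i]
--         b = password[i + 1]
--         if a == b:
--             pair_positions.add(i)
--             pair_positions.add(i + 1)
--
--     return len(pair_positions) >= 4
-- ===== SOURCE B (Python) =====
-- def requirement_three(password):
--     count = 0
--     i = 0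
--     while i < len(password) - 1:
--         if password[i] == password[i + 1]:
--             count += 1
--             i += 2
--         else:
--             i += 1
--     return count >= 2
-- ===== Notes on version B (the rewrite author's own statement) =====
-- stated objective: simpler
-- what changed: Replaces the set of pair-covered index positions (len(set)>=4) by a single greedy skip-ahead scan that counts non-overlapping adjacent equal pairs and checks count>=2.
import Mathlib
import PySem

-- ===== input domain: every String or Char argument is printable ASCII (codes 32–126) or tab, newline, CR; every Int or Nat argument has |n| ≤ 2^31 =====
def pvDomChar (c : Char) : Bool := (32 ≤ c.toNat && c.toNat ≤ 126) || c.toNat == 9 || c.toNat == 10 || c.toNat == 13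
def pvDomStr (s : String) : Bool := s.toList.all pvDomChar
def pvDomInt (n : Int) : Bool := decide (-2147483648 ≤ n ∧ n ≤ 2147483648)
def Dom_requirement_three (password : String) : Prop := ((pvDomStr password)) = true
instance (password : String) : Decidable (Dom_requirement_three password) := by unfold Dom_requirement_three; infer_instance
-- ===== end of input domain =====

-- B replaces A's set of pair-covered index positions (len >= 4) by a greedy skip-ahead scan
-- counting non-overlapping adjacent equal pairs (count >= 2): simpler, no set.

-- ===== PORT A =====
-- loop body of A: for i in range(len(password)-1): a = password[i]; b = password[i+1];
-- if a == b: pair_positions.add(i); pair_positions.add(i+1)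
-- (the 'none' match arms are unreachable: i and i+1 are always in range)
def stepA (l : List Char) (pp : PySem.Set Int) (i : Int) : PySem.Set Int :=
  match PySem.List.pyGet? l i, PySem.List.pyGet? l (i + 1) with
  | some a, some b => if a = b then PySem.Set.add (PySem.Set.add pp i) (i + 1) else pp
  | _, _ => pp

def requirement_three (password : String) : Bool :=
  let pp : PySem.Set Int :=
    (PySem.List.pyRange 0 (PySem.Str.len password - 1) 1).foldl (stepA password.toList)
      PySem.Set.empty
  decide (4 ≤ pp.length)

-- ===== PORT B =====
-- B's while loop 'i < len-1; if password[i]==password[i+1]: count+=1; i+=2 else i+=1'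
-- as structural recursion on the character list
def altCount : List Char → Nat
  | a :: b :: rest => if a = b then altCount rest + 1 else altCount (b :: rest)
  | _ => 0

def requirement_three_alt (password : String) : Bool :=
  decide (2 ≤ altCount password.toList)

-- ===== PRECONDITION & SPEC =====
def Spec_requirement_three (password : String) (out : Bool) : Prop := out = requirement_three_alt password
instance (password : String) (out : Bool) : Decidable (Spec_requirement_three password out) := by unfold Spec_requirement_three; infer_instance

-- ===== CLAIM (what is proved, stated in full; the proofs are below) =====
def Claim_equal_requirement_three : Prop := ∀ (password : String), Dom_requirement_three password → Spec_requirement_three password (requirement_three password)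

-- ===== LEMMAS AND PROOFS =====

-- number of indices of t that become NEWLY covered by a pair, given that the character
-- just before t's head already covers the head from the left iff prev
def covNew : Bool → List Char → Nat
  | _, [] => 0
  | _, [_] => 0
  | prev, a :: b :: rest =>
      (if a = b then (if prev then 1 else 2) else 0) + covNew (a = b) (b :: rest)

theorem covNew_short (prev : Bool) (t : List Char) (h : t.length ≤ 1) : covNew prev t = 0 := by
  match t with
  | [] => rfl
  | [_] => rfl
  | _ :: _ :: _ => simp at h

-- A's fold, started at index a with a set S of already-covered indices, adds exactly
-- covNew prev (l.drop a) new elements, where prev says whether a is already in S.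
theorem foldA_length (l : List Char) (a : Nat) (S : PySem.Set Int) (prev : Bool)
    (hle : ∀ x ∈ S, x ≤ (a : Int)) (hnd : S.Nodup) (hprev : ((a : Int) ∈ S) ↔ prev = true) :
    ((PySem.List.pyRange (a : Int) ((l.length : Int) - 1) 1).foldl (stepA l) S).length
      = S.length + covNew prev (l.drop a) := by
  by_cases h : (a : Int) < (l.length : Int) - 1
  · have ha : a < l.length := by omega
    have ha1 : a + 1 < l.length := by omega
    have hga : PySem.List.pyGet? l (a : Int) = some l[a] := PySem.List.pyGet?_ofNat l a ha
    have hga1 : PySem.List.pyGet? l ((a : Int) + 1) = some l[a + 1] := by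
      have := PySem.List.pyGet?_ofNat l (a + 1) ha1
      push_cast at this
      exact this
    have hdrop : l.drop a = l[a] :: l[a + 1] :: l.drop (a + 2) := by
      rw [List.drop_eq_getElem_cons ha, List.drop_eq_getElem_cons ha1]
    have hcast : (a : Int) + 1 = ((a + 1 : Nat) : Int) := by push_cast; ring
    have hdrop1 : l.drop (a + 1) = l[a + 1] :: l.drop (a + 2) := List.drop_eq_getElem_cons ha1
    rw [PySem.List.pyRange_one_cons h, List.foldl_cons]
    by_cases hab : l[a] = l[a + 1]
    · have hstep : stepA l S (a : Int) = PySem.Set.add (PySem.Set.add S (a : Int)) (((a + 1 : Nat)) : Int) := by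
        rw [← hcast]
        simp [stepA, hga, hga1, hab]
      have hna1 : (((a + 1 : Nat)) : Int) ∉ PySem.Set.add S (a : Int) := by
        intro hx
        rcases (PySem.Set.mem_add S _ _).1 hx with hx | hx
        · have := hle _ hx; omega
        · omega
      have hlen' : (PySem.Set.add (PySem.Set.add S (a : Int)) (((a + 1 : Nat)) : Int)).length
          = S.length + (if prev then 1 else 2) := by
        rw [PySem.Set.add_of_not_mem hna1]
        by_cases hp : prev
        · rw [PySem.Set.add_of_mem (hprev.2 (by simp [hp]))]
          simp [hp]
        · have hna : (a : Int) ∉ S := fun hx => hp (by simpa using hprev.1 hx)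
          rw [PySem.Set.add_of_not_mem hna]
          simp [hp]
      have hle' : ∀ x ∈ PySem.Set.add (PySem.Set.add S (a : Int)) (((a + 1 : Nat)) : Int), x ≤ ((a + 1 : Nat) : Int) := by
        intro x hx
        rcases (PySem.Set.mem_add _ _ _).1 hx with hx | hx
        · rcases (PySem.Set.mem_add S _ _).1 hx with hx | hx
          · have := hle _ hx; omega
          · omega
        · omega
      have hnd' : (PySem.Set.add (PySem.Set.add S (a : Int)) (((a + 1 : Nat)) : Int)).Nodup :=
        PySem.Set.nodup_add _ _ (PySem.Set.nodup_add _ _ hnd)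
      have hprev' : (((a + 1 : Nat) : Int) ∈ PySem.Set.add (PySem.Set.add S (a : Int)) (((a + 1 : Nat)) : Int)) ↔ true = true := by
        simp [PySem.Set.mem_add]
      have IH := foldA_length l (a + 1) (PySem.Set.add (PySem.Set.add S (a : Int)) (((a + 1 : Nat)) : Int)) true hle' hnd' hprev'
      have hcov : covNew prev (l.drop a) = (if prev = true then 1 else 2) + covNew true (l.drop (a + 1)) := by
        rw [hdrop, hdrop1]
        simp [covNew, if_pos hab, decide_eq_true hab]
      rw [hstep, hcast, IH, hlen', hcov]
      omega
    · have hstep : stepA l S (a : Int) = S := by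
        simp [stepA, hga, hga1, hab]
      have hle' : ∀ x ∈ S, x ≤ ((a + 1 : Nat) : Int) := by
        intro x hx; have := hle _ hx; omega
      have hprev' : (((a + 1 : Nat) : Int) ∈ S) ↔ false = true := by
        constructor
        · intro hx; have := hle _ hx; omega
        · simp
      have IH := foldA_length l (a + 1) S false hle' hnd hprev'
      have hcov : covNew prev (l.drop a) = covNew false (l.drop (a + 1)) := by
        rw [hdrop, hdrop1]
        simp [covNew, if_neg hab, decide_eq_false hab]
      rw [hstep, hcast, IH, hcov]
  · rw [PySem.List.pyRange_one_eq_nil (by omega), List.foldl_nil,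
      covNew_short prev _ (by rw [List.length_drop]; omega)]
    omega
termination_by l.length - a
decreasing_by all_goals omega

theorem covNew_ge : ∀ (t : List Char),
    2 * altCount t ≤ covNew false t ∧ 2 * altCount t ≤ covNew true t + 1
  | [] => by simp [altCount, covNew]
  | [_] => by simp [altCount, covNew]
  | a :: b :: r => by
    by_cases hab : a = b
    · cases r with
      | nil => simp [altCount, covNew, if_pos hab]
      | cons z r2 =>
        have ih := covNew_ge (z :: r2)
        by_cases hyz : b = z
        · simp [altCount, covNew, if_pos hab, if_pos hyz, decide_eq_true hab, decide_eq_true hyz]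
          omega
        · simp [altCount, covNew, if_pos hab, if_neg hyz, decide_eq_true hab, decide_eq_false hyz]
          omega
    · have ih := covNew_ge (b :: r)
      simp [altCount, covNew, if_neg hab, decide_eq_false hab]
      omega
termination_by t => t.length

theorem covNew_zero : ∀ (t : List Char) (prev : Bool), altCount t = 0 → covNew prev t = 0
  | [], _, _ => rfl
  | [_], _, _ => rfl
  | a :: b :: r, prev, h => by
    by_cases hab : a = b
    · rw [altCount, if_pos hab] at h
      omega
    · rw [altCount, if_neg hab] at h
      simp [covNew, if_neg hab, decide_eq_false hab, covNew_zero (b :: r) false h]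

theorem covNew_true_le (y : Char) (r : List Char) (h : altCount r = 0) : covNew true (y :: r) ≤ 1 := by
  cases r with
  | nil => simp [covNew]
  | cons z r2 =>
    by_cases hyz : y = z
    · simp [covNew, if_pos hyz, decide_eq_true hyz, covNew_zero (z :: r2) true h]
    · simp [covNew, if_neg hyz, decide_eq_false hyz, covNew_zero (z :: r2) false h]

theorem covNew_le : ∀ (t : List Char), altCount t ≤ 1 → covNew false t ≤ 3
  | [], _ => by simp [covNew]
  | [_], _ => by simp [covNew]
  | a :: b :: r, h => by
    by_cases hab : a = b
    · rw [altCount, if_pos hab] at h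
      have := covNew_true_le b r (by omega)
      simp [covNew, if_pos hab, decide_eq_true hab]
      omega
    · rw [altCount, if_neg hab] at h
      have := covNew_le (b :: r) h
      simp [covNew, if_neg hab, decide_eq_false hab]
      omega

theorem cov_iff (t : List Char) : 4 ≤ covNew false t ↔ 2 ≤ altCount t := by
  constructor
  · intro h
    by_contra hc
    have := covNew_le t (by omega)
    omega
  · intro h
    have := (covNew_ge t).1
    omega

-- ===== VERDICT (by name: the statement is the Claim_ definition above) =====
theorem requirement_three_spec : Claim_equal_requirement_three := by
  intro password _
  unfold Spec_requirement_three requirement_three requirement_three_alt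
  have h := foldA_length password.toList 0 PySem.Set.empty false
      (by intro x hx; simp [PySem.Set.empty] at hx) (by simp [PySem.Set.empty])
      (by simp [PySem.Set.empty])
  simp only [Nat.cast_zero, List.drop_zero, PySem.Set.empty, List.length_nil, Nat.zero_add] at h
  simp only [PySem.Str.len_eq, PySem.Set.empty]
  simp only [h]
  exact decide_eq_decide.mpr (cov_iff password.toList)
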